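-- pv_equiv track=rewrite | github.com/ChazzCoin/FairWeb | Futils/URL.py | extract_siteName_one_period
-- ===== SOURCE A (Python) =====
-- def extract_siteName_one_period(url):
--     """ PRIVATE """
--     i = 0
--     slash_count = 0
--     removal_index = 0
--     for char in url:
--         if char == "/":
--             slash_count += 1
--             if slash_count == 2:
--                 removal_index = i+1
--         if char == '.':
--             return url[removal_index:i]
--         i += 1
--     return url
-- ===== SOURCE B (Python) =====
-- def extract_siteName_one_period(url):
--     """ PRIVATE """
--     chars = list(url)
--     if '.' not in chars:
--         return url
--     dot = chars.index('.')
--     slashes = [k for k, c in enumerate(chars[:dot]) if c == '/']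
--     start = slashes[1] + 1 if len(slashes) >= 2 else 0
--     return ''.join(chars[start:dot])
-- ===== Notes on version B (the rewrite author's own statement) =====
-- stated objective: simpler
-- what changed: Replaces A's single stateful per-character loop (position/slash-count/removal-index accumulators with early return) by a direct decomposition: find the first period, collect slash positions before it with a comprehension, and take one slice.
import Mathlib
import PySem

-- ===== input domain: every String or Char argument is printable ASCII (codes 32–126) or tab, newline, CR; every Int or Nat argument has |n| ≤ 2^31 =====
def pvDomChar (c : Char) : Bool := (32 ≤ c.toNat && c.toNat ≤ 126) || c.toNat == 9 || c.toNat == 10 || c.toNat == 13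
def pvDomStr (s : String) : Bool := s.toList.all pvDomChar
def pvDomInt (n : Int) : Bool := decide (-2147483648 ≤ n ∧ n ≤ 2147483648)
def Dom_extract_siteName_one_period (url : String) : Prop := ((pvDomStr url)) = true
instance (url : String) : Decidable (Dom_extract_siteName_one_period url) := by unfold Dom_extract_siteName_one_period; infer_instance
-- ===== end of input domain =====

-- B replaces A's single stateful char loop (slash/index counters) by a direct
-- decomposition: locate the first '.', collect the slash positions before it,
-- and slice once — objective: simpler.


-- ===== PORT A =====
-- the for-loop over url's characters with state (i, slash_count, removal_index)
def pvGoA (url : String) : List Char → Int → Int → Int → String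
  | [], _, _, _ => url
  | c :: rest, i, sc, ri =>
    if c = '/' then
      pvGoA url rest (i + 1) (sc + 1) (if sc + 1 = 2 then i + 1 else ri)
    else if c = '.' then
      PySem.Str.slice url (some ri) (some i)
    else
      pvGoA url rest (i + 1) sc ri

def extract_siteName_one_period (url : String) : String :=
  pvGoA url url.toList 0 0 0

-- ===== PORT B =====
def extract_siteName_one_period_alt (url : String) : String :=
  let chars := url.toList
  if '.' ∈ chars then
    match PySem.List.index? chars '.' with
    | none => url   -- unreachable: guarded by the membership test
    | some dot =>
      let slashes := ((PySem.List.enumerate (PySem.List.slice chars none (some (dot : Int)))).filter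
        (fun kc => kc.2 = '/')).map (fun kc => kc.1)
      let start : Int := if 2 ≤ slashes.length then PySem.List.pyGetD slashes 1 0 + 1 else 0
      String.ofList (PySem.List.slice chars (some start) (some (dot : Int)))
  else url

-- ===== PRECONDITION & SPEC =====
def Spec_extract_siteName_one_period (url : String) (out : String) : Prop := out = extract_siteName_one_period_alt url
instance (url : String) (out : String) : Decidable (Spec_extract_siteName_one_period url out) := by unfold Spec_extract_siteName_one_period; infer_instance

-- ===== CLAIM (what is proved, stated in full; the proofs are below) =====
def Claim_equal_extract_siteName_one_period : Prop := ∀ (url : String), Dom_extract_siteName_one_period url → Spec_extract_siteName_one_period url (extract_siteName_one_period url)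

-- ===== LEMMAS AND PROOFS =====

-- the slash-position list B computes for a prefix p of the input
def pvSlashes (p : List Char) : List Int :=
  ((PySem.List.enumerate p).filter (fun kc => kc.2 = '/')).map (fun kc => kc.1)

-- the start index B computes for a prefix p
def pvStart (p : List Char) : Int :=
  if 2 ≤ (pvSlashes p).length then PySem.List.pyGetD (pvSlashes p) 1 0 + 1 else 0

lemma pvSlashes_append (p : List Char) (c : Char) :
    pvSlashes (p ++ [c]) = pvSlashes p ++ (if c = '/' then [(p.length : Int)] else []) := by
  unfold pvSlashes
  rw [PySem.List.enumerate_append, List.filter_append, List.map_append]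
  congr 1
  simp [PySem.List.enumerate_cons, PySem.List.enumerate_nil]
  split_ifs with h <;> simp [h]

lemma pvSlashes_length (p : List Char) : (pvSlashes p).length = p.count '/' := by
  induction p using List.reverseRecOn with
  | nil => rfl
  | append_singleton p c ih =>
    rw [pvSlashes_append]
    by_cases hc : c = '/' <;>
      simp [hc, ih, List.count_append]

lemma pvStart_append_slash (p : List Char) :
    pvStart (p ++ ['/']) = if (p.count '/' : Int) + 1 = 2 then (p.length : Int) + 1 else pvStart p := by
  have hs : pvSlashes (p ++ ['/']) = pvSlashes p ++ [(p.length : Int)] := by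
    rw [pvSlashes_append]; simp
  have hl := pvSlashes_length p
  unfold pvStart
  rw [hs]
  rcases hsp : pvSlashes p with _ | ⟨a, _ | ⟨b, t⟩⟩
  · -- no slash yet: slash_count becomes 1
    have : p.count '/' = 0 := by rw [← hl, hsp]; rfl
    simp [this]
  · -- exactly one slash so far: this is the second slash
    have : p.count '/' = 1 := by rw [← hl, hsp]; rfl
    simp [this, PySem.List.pyGetD]
  · -- already ≥ 2 slashes: second entry unchanged
    have h2 : p.count '/' = 2 + t.length := by rw [← hl, hsp]; simp; omega
    have hg : PySem.List.pyGetD ((a :: b :: t) ++ [(p.length : Int)]) 1 0 = b := by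
      have := PySem.List.pyGetD_natCast ((a :: b :: t) ++ [(p.length : Int)]) 1 0
      simpa [List.getD] using this
    have hg' : PySem.List.pyGetD (a :: b :: t) 1 0 = b := by
      have := PySem.List.pyGetD_natCast (a :: b :: t) 1 0
      simpa [List.getD] using this
    rw [List.cons_append, List.cons_append] at hg
    simp [hg, hg', h2]
    omega

lemma pvStart_append_other (p : List Char) (c : Char) (hc : c ≠ '/') :
    pvStart (p ++ [c]) = pvStart p := by
  unfold pvStart
  rw [pvSlashes_append]
  simp [hc]

lemma pvStart_nil : pvStart [] = 0 := rfl

lemma pvGoA_eq (url : String) (rest : List Char) :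
    ∀ p : List Char, url.toList = p ++ rest → '.' ∉ p →
    pvGoA url rest (p.length : Int) ((p.count '/' : Nat) : Int) (pvStart p) =
      extract_siteName_one_period_alt url := by
  induction rest with
  | nil =>
    intro p hurl hdot
    show url = _
    unfold extract_siteName_one_period_alt
    rw [hurl]
    simp [hdot]
  | cons c rest ih =>
    intro p hurl hdot
    by_cases hc : c = '/'
    · subst hc
      rw [pvGoA]
      rw [if_pos rfl]
      have h1 : ((p.length : Int) + 1) = ((p ++ ['/']).length : Int) := by simp
      have h2 : ((p.count '/' : Nat) : Int) + 1 = (((p ++ ['/']).count '/' : Nat) : Int) := by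
        simp [List.count_append]
      have h3 : (if ((p.count '/' : Nat) : Int) + 1 = 2 then (p.length : Int) + 1 else pvStart p)
          = pvStart (p ++ ['/']) := by
        rw [pvStart_append_slash]
      rw [h3, h1, h2]
      exact ih (p ++ ['/']) (by rw [hurl, List.append_assoc]; rfl)
        (by simp [hdot])
    · by_cases hd : c = '.'
      · subst hd
        rw [pvGoA]
        rw [if_neg hc, if_pos rfl]
        -- A returns url[removal_index : i]; B computes the same slice
        unfold extract_siteName_one_period_alt
        rw [hurl]
        have hmem : '.' ∈ p ++ '.' :: rest := by simp
        have hidx : PySem.List.index? (p ++ '.' :: rest) '.' = some p.length :=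
          (PySem.List.index?_eq_some_iff _ _ _).mpr ⟨p, rest, rfl, rfl, hdot⟩
        simp only [if_pos hmem, hidx]
        have htake : PySem.List.slice (p ++ '.' :: rest) none (some (p.length : Int)) = p := by
          rw [PySem.List.slice_to_natCast, List.take_left]
        rw [htake]
        show PySem.Str.slice url (some (pvStart p)) (some (p.length : Int)) = _
        unfold PySem.Str.slice
        rw [hurl]
        rfl
      · rw [pvGoA]
        simp only [if_neg hc, if_neg hd]
        have h1 : ((p.length : Int) + 1) = ((p ++ [c]).length : Int) := by simp
        have h2 : ((p.count '/' : Nat) : Int) = (((p ++ [c]).count '/' : Nat) : Int) := by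
          simp [List.count_append, hc]
        have h3 : pvStart p = pvStart (p ++ [c]) := (pvStart_append_other p c hc).symm
        rw [h3, h1, h2]
        exact ih (p ++ [c]) (by rw [hurl, List.append_assoc]; rfl)
          (by simp [hdot, Ne.symm hd])

-- ===== VERDICT (by name: the statement is the Claim_ definition above) =====
theorem extract_siteName_one_period_spec : Claim_equal_extract_siteName_one_period := by
  intro url _
  show _ = _
  unfold extract_siteName_one_period
  have := pvGoA_eq url url.toList [] (by simp) (by simp)
  simpa [pvStart_nil] using this
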